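-- pv_equiv track=rewrite | github.com/VassilisSoum/Tracetap | src/tracetap/contract/contract_creator.py | _detect_operation_security
-- ===== SOURCE A (Python) =====
-- from typing import Any, Dict, List, Optional, Set, Tuple
--
-- def _detect_operation_security(requests: List[Dict]) -> Optional[List[Dict]]:
--     """Detect security requirements for operation"""
--     # Check if any request has authorization
--     has_auth = any(
--         req.get('headers', {}).get('Authorization') or
--         req.get('headers', {}).get('authorization')
--         for req in requests
--     )
--
--     if has_auth:
--         # Detect scheme type
--         for req in requests:
--             auth_header = req.get('headers', {}).get('Authorization') or \
--                          req.get('headers', {}).get('authorization')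
--             if auth_header:
--                 if 'Bearer' in auth_header:
--                     return [{'bearerAuth': []}]
--                 elif 'Basic' in auth_header:
--                     return [{'basicAuth': []}]
--
--     # Check for API key
--     has_api_key = any(
--         'X-API-Key' in req.get('headers', {}) or
--         'x-api-key' in req.get('headers', {})
--         for req in requests
--     )
--
--     if has_api_key:
--         return [{'apiKeyAuth': []}]
--
--     return None
-- ===== SOURCE B (Python) =====
-- from typing import Dict, List, Optional
--
-- def _detect_operation_security(requests: List[Dict]) -> Optional[List[Dict]]:
--     """Detect security requirements for operation (single pass)."""
--     has_api_key = False
--     for req in requests: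
--         headers = req.get('headers', {})
--         auth_header = headers.get('Authorization') or headers.get('authorization')
--         if auth_header:
--             if 'Bearer' in auth_header:
--                 return [{'bearerAuth': []}]
--             if 'Basic' in auth_header:
--                 return [{'basicAuth': []}]
--         if 'X-API-Key' in headers or 'x-api-key' in headers:
--             has_api_key = True
--     return [{'apiKeyAuth': []}] if has_api_key else None
-- ===== Notes on version B (the rewrite author's own statement) =====
-- stated objective: simpler
-- what changed: Replaces A's three separate passes (has_auth any-scan, scheme loop, api-key any-scan) by one loop over requests with a single has_api_key boolean accumulator and early returns for Bearer/Basic.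
import Mathlib
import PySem

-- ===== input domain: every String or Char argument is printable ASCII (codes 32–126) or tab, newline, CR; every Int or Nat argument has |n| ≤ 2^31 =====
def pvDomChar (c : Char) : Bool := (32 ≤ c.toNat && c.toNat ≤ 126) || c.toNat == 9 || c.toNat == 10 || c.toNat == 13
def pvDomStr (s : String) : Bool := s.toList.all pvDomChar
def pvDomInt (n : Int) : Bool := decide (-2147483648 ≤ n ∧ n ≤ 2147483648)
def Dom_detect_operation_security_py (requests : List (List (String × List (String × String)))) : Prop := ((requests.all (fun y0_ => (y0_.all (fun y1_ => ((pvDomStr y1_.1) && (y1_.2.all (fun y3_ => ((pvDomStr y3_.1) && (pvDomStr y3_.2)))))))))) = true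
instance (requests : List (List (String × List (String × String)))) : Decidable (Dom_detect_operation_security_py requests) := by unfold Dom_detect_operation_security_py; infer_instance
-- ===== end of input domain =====

-- B collapses A's three passes into a single loop with one boolean accumulator; same return value, no speed claim.

-- ===== PORT A =====
-- Python `x or y` on two Optional[str] values: x if x is truthy (non-None, non-empty) else y
def pvPyOrStr (a b : Option String) : Option String :=
  match a with
  | some s => if s == "" then b else some s
  | none => b

-- auth_header = req.get('headers', {}).get('Authorization') or req.get('headers', {}).get('authorization')
def pvAuthA (req : List (String × List (String × String))) : Option String :=
  pvPyOrStr (PySem.Dict.get? (PySem.Dict.mk (PySem.Dict.getD (PySem.Dict.mk req) "headers" [])) "Authorization")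
            (PySem.Dict.get? (PySem.Dict.mk (PySem.Dict.getD (PySem.Dict.mk req) "headers" [])) "authorization")

-- the `for req in requests:` scheme loop; `some r` = early return, `none` = fell through
def pvSchemeLoopA : List (List (String × List (String × String))) → Option (List (List (String × List String)))
  | [] => none
  | req :: rest =>
    match pvAuthA req with
    | some s =>
      if s == "" then pvSchemeLoopA rest
      else if PySem.Str.isIn "Bearer" s then some [[("bearerAuth", [])]]
      else if PySem.Str.isIn "Basic" s then some [[("basicAuth", [])]]
      else pvSchemeLoopA rest
    | none => pvSchemeLoopA rest

def detect_operation_security_py (requests : List (List (String × List (String × String)))) : Option (List (List (String × List String))) :=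
  let has_auth := requests.any (fun req => match pvAuthA req with | some s => !(s == "") | none => false)
  let afterScheme : Option (List (List (String × List String))) :=
    if has_auth then pvSchemeLoopA requests else none
  match afterScheme with
  | some r => some r
  | none =>
    let has_api_key := requests.any (fun req =>
      PySem.Dict.contains (PySem.Dict.mk (PySem.Dict.getD (PySem.Dict.mk req) "headers" [])) "X-API-Key" ||
      PySem.Dict.contains (PySem.Dict.mk (PySem.Dict.getD (PySem.Dict.mk req) "headers" [])) "x-api-key")
    if has_api_key then some [[("apiKeyAuth", [])]] else none

-- ===== PORT B =====
-- the single loop of Source B: early return on Bearer/Basic, `has_api_key` accumulator, final return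
def pvGoB : List (List (String × List (String × String))) → Bool → Option (List (List (String × List String)))
  | [], has_api_key => if has_api_key then some [[("apiKeyAuth", [])]] else none
  | req :: rest, has_api_key =>
    let headers := PySem.Dict.getD (PySem.Dict.mk req) "headers" []
    let auth_header := pvPyOrStr (PySem.Dict.get? (PySem.Dict.mk headers) "Authorization") (PySem.Dict.get? (PySem.Dict.mk headers) "authorization")
    match auth_header with
    | some s =>
      if s == "" then
        pvGoB rest (has_api_key || PySem.Dict.contains (PySem.Dict.mk headers) "X-API-Key" || PySem.Dict.contains (PySem.Dict.mk headers) "x-api-key")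
      else if PySem.Str.isIn "Bearer" s then some [[("bearerAuth", [])]]
      else if PySem.Str.isIn "Basic" s then some [[("basicAuth", [])]]
      else pvGoB rest (has_api_key || PySem.Dict.contains (PySem.Dict.mk headers) "X-API-Key" || PySem.Dict.contains (PySem.Dict.mk headers) "x-api-key")
    | none =>
      pvGoB rest (has_api_key || PySem.Dict.contains (PySem.Dict.mk headers) "X-API-Key" || PySem.Dict.contains (PySem.Dict.mk headers) "x-api-key")

def detect_operation_security_py_alt (requests : List (List (String × List (String × String)))) : Option (List (List (String × List String))) :=
  pvGoB requests false

-- ===== PRECONDITION & SPEC =====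
def Spec_detect_operation_security_py (requests : List (List (String × List (String × String)))) (out : Option (List (List (String × List String)))) : Prop := out = detect_operation_security_py_alt requests
instance (requests : List (List (String × List (String × String)))) (out : Option (List (List (String × List String)))) : Decidable (Spec_detect_operation_security_py requests out) := by unfold Spec_detect_operation_security_py; infer_instance

-- ===== CLAIM (what is proved, stated in full; the proofs are below) =====
def Claim_equal_detect_operation_security_py : Prop := ∀ (requests : List (List (String × List (String × String)))), Dom_detect_operation_security_py requests → Spec_detect_operation_security_py requests (detect_operation_security_py requests)

-- ===== LEMMAS AND PROOFS =====

def pvApiPred (req : List (String × List (String × String))) : Bool :=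
  PySem.Dict.contains (PySem.Dict.mk (PySem.Dict.getD (PySem.Dict.mk req) "headers" [])) "X-API-Key" ||
  PySem.Dict.contains (PySem.Dict.mk (PySem.Dict.getD (PySem.Dict.mk req) "headers" [])) "x-api-key"

-- the single loop of B equals: A's scheme loop, falling through to an api-key scan seeded by the accumulator
theorem pvGoB_eq (requests : List (List (String × List (String × String)))) (hak : Bool) :
    pvGoB requests hak =
      match pvSchemeLoopA requests with
      | some r => some r
      | none => if hak || requests.any pvApiPred then some [[("apiKeyAuth", [])]] else none := by
  induction requests generalizing hak with
  | nil => cases hak <;> rfl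
  | cons req rest ih =>
    simp only [pvGoB, pvSchemeLoopA, pvAuthA, List.any_cons]
    cases pvPyOrStr (PySem.Dict.get? (PySem.Dict.mk (PySem.Dict.getD (PySem.Dict.mk req) "headers" [])) "Authorization")
        (PySem.Dict.get? (PySem.Dict.mk (PySem.Dict.getD (PySem.Dict.mk req) "headers" [])) "authorization") with
    | none =>
      rw [ih]
      cases pvSchemeLoopA rest with
      | some r => rfl
      | none => simp only [pvApiPred]; cases hak <;> simp only [Bool.false_or, Bool.true_or, Bool.or_assoc]
    | some s =>
      dsimp only
      by_cases hs : (s == "") = true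
      · rw [if_pos hs, if_pos hs, ih]
        cases pvSchemeLoopA rest with
        | some r => rfl
        | none => simp only [pvApiPred]; cases hak <;> simp only [Bool.false_or, Bool.true_or, Bool.or_assoc]
      · rw [if_neg hs, if_neg hs]
        by_cases hb : (PySem.Str.isIn "Bearer" s) = true
        · rw [if_pos hb, if_pos hb]
        · rw [if_neg hb, if_neg hb]
          by_cases hc : (PySem.Str.isIn "Basic" s) = true
          · rw [if_pos hc, if_pos hc]
          · rw [if_neg hc, if_neg hc, ih]
            cases pvSchemeLoopA rest with
            | some r => rfl
            | none => simp only [pvApiPred]; cases hak <;> simp only [Bool.false_or, Bool.true_or, Bool.or_assoc]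

-- if no request has a truthy Authorization header, A's scheme loop falls through
theorem pvSchemeLoopA_none (requests : List (List (String × List (String × String))))
    (h : requests.any (fun req => match pvAuthA req with | some s => !(s == "") | none => false) = false) :
    pvSchemeLoopA requests = none := by
  induction requests with
  | nil => rfl
  | cons req rest ih =>
    simp only [List.any_cons, Bool.or_eq_false_iff] at h
    obtain ⟨h1, h2⟩ := h
    simp only [pvSchemeLoopA]
    cases ha : pvAuthA req with
    | none => exact ih h2
    | some s =>
      rw [ha] at h1
      simp only [Bool.not_eq_false'] at h1
      simp [h1, ih h2]

-- ===== VERDICT (by name: the statement is the Claim_ definition above) =====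
theorem detect_operation_security_py_spec : Claim_equal_detect_operation_security_py := by
  intro requests _
  unfold Spec_detect_operation_security_py
  simp only [detect_operation_security_py, detect_operation_security_py_alt]
  rw [pvGoB_eq]
  by_cases h : (requests.any (fun req => match pvAuthA req with | some s => !(s == "") | none => false)) = true
  · rw [if_pos h]
    rfl
  · rw [Bool.not_eq_true] at h
    rw [if_neg (by simp [h]), pvSchemeLoopA_none requests h]
    rfl
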